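-- pv_equiv track=rewrite | github.com/prakharmishra2002/GFG-POTD-Solution | January 2026/06.py | maxSubarrayXOR
-- ===== SOURCE A (Python) =====
-- def maxSubarrayXOR(arr, k):
--     n = len(arr)
--     if n == 0 or k == 0 or k > n:
--         return 0  # though constraints guarantee valid input
--
--     # Compute prefix XOR array
--     # prefix[i] = XOR of elements from index 0 to i-1
--     prefix = [0] * (n + 1)
--     for i in range(n):
--         prefix[i + 1] = prefix[i] ^ arr[i]
--
--     # Now we need to find maximum prefix[j] ^ prefix[i] where j - i == k
--     # i.e., for every possible ending index j (from k-1 to n-1),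
--     # compute prefix[j+1] ^ prefix[j+1 - k] and keep the maximum
--     ans = 0
--     for j in range(k - 1, n):
--         current_xor = prefix[j + 1] ^ prefix[j + 1 - k]
--         ans = max(ans, current_xor)
--
--     return ans
-- ===== SOURCE B (Python) =====
-- def maxSubarrayXOR(arr, k):
--     n = len(arr)
--     if n == 0 or k <= 0 or k > n:
--         return 0
--     window = 0
--     for x in arr[:k]:
--         window ^= x
--     ans = max(0, window)
--     for i in range(k, n):
--         window ^= arr[i] ^ arr[i - k]
--         ans = max(ans, window)
--     return ans
-- ===== Notes on version B (the rewrite author's own statement) =====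
-- stated objective: simpler
-- what changed: B drops A's materialized prefix-XOR table and index arithmetic: it seeds one rolling window XOR from the first k elements and slides it with window ^= arr[i] ^ arr[i-k], keeping a running max.
import Mathlib
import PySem

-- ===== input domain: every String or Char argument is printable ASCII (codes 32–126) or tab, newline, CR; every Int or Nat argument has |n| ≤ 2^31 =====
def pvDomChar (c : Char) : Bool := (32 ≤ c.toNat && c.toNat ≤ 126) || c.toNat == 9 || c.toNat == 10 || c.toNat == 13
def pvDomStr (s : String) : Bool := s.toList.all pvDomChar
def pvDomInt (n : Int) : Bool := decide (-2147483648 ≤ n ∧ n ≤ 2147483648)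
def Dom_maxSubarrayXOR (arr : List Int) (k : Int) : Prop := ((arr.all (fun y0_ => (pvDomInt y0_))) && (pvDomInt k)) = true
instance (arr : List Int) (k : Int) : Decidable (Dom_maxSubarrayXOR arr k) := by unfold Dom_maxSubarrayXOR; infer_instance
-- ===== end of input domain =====

-- B replaces A's prefix-XOR table by a single rolling window XOR (same O(n) time, O(1) extra space).

-- ===== PORT A =====
def maxSubarrayXOR (arr : List Int) (k : Int) : Int :=
  let n : Int := arr.length
  if n = 0 ∨ k = 0 ∨ n < k then 0
  else
    let pfx : List Int :=
      (PySem.List.pyRange 0 n 1).foldl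
        (fun p i =>
          PySem.List.pySetD p (i + 1)
            (PySem.Int.bxor (PySem.List.pyGetD p i 0) (PySem.List.pyGetD arr i 0)))
        (List.replicate (n + 1).toNat 0)
    (PySem.List.pyRange (k - 1) n 1).foldl
      (fun ans j =>
        max ans (PySem.Int.bxor (PySem.List.pyGetD pfx (j + 1) 0)
                                (PySem.List.pyGetD pfx (j + 1 - k) 0)))
      0

-- ===== PORT B =====
def maxSubarrayXOR_alt (arr : List Int) (k : Int) : Int :=
  let n : Int := arr.length
  if n = 0 ∨ k ≤ 0 ∨ n < k then 0
  else
    let window : Int := (PySem.List.slice arr none (some k)).foldl (fun w x => PySem.Int.bxor w x) 0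
    let st :=
      (PySem.List.pyRange k n 1).foldl
        (fun (st : Int × Int) i =>
          let w := PySem.Int.bxor st.2
            (PySem.Int.bxor (PySem.List.pyGetD arr i 0) (PySem.List.pyGetD arr (i - k) 0))
          (max st.1 w, w))
        (max 0 window, window)
    st.1

-- ===== PRECONDITION & SPEC =====
-- Pre_ excludes exactly the inputs where A raises IndexError: a negative k on a non-empty list
-- (the second loop then reads prefix[n-k] past the end of the prefix table).
def Pre_maxSubarrayXOR (arr : List Int) (k : Int) : Prop := 0 ≤ k ∨ arr = []
instance (arr : List Int) (k : Int) : Decidable (Pre_maxSubarrayXOR arr k) := by unfold Pre_maxSubarrayXOR; infer_instance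
def pvWitness_maxSubarrayXOR : List Int × Int := ([3, 7, 2, 5], 2)

def Spec_maxSubarrayXOR (arr : List Int) (k : Int) (out : Int) : Prop := out = maxSubarrayXOR_alt arr k
instance (arr : List Int) (k : Int) (out : Int) : Decidable (Spec_maxSubarrayXOR arr k out) := by unfold Spec_maxSubarrayXOR; infer_instance

-- ===== CLAIM (what is proved, stated in full; the proofs are below) =====
def Claim_equal_maxSubarrayXOR : Prop := ∀ (arr : List Int) (k : Int), Dom_maxSubarrayXOR arr k → Pre_maxSubarrayXOR arr k → Spec_maxSubarrayXOR arr k (maxSubarrayXOR arr k)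

-- ===== LEMMAS AND PROOFS =====

-- XOR of the first i elements (prefix[i] in A's table, and the algebra behind B's window)
def pxor (arr : List Int) (i : Nat) : Int := (arr.take i).foldl PySem.Int.bxor 0

-- the window XOR ending at index t-1 for window size K
def wnd (arr : List Int) (K t : Nat) : Int := PySem.Int.bxor (pxor arr t) (pxor arr (t - K))

theorem bxor_eq_xor (a b : Int) : PySem.Int.bxor a b = Int.xor a b := by
  rcases a with a | a <;> rcases b with b | b <;>
    simp [PySem.Int.bxor, Int.xor, Int.negSucc_eq] <;> omega

theorem xor_assoc' (a b c : Int) : Int.xor (Int.xor a b) c = Int.xor a (Int.xor b c) := by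
  rcases a with a | a <;> rcases b with b | b <;> rcases c with c | c <;>
    simp [Int.xor, Nat.xor_assoc]

theorem bxor_assoc (a b c : Int) :
    PySem.Int.bxor (PySem.Int.bxor a b) c = PySem.Int.bxor a (PySem.Int.bxor b c) := by
  simp [bxor_eq_xor, xor_assoc']

theorem bxor_shuffle (p q x y : Int) :
    PySem.Int.bxor (PySem.Int.bxor p x) (PySem.Int.bxor q y)
      = PySem.Int.bxor (PySem.Int.bxor p q) (PySem.Int.bxor x y) := by
  rw [bxor_assoc, bxor_assoc, ← bxor_assoc x q y, PySem.Int.bxor_comm x q, bxor_assoc]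

theorem pxor_succ (arr : List Int) (m : Nat) (h : m < arr.length) :
    pxor arr (m + 1) = PySem.Int.bxor (pxor arr m) arr[m] := by
  unfold pxor
  rw [List.take_add_one, List.getElem?_eq_getElem h, Option.toList_some, List.foldl_concat]

-- invariant of A's prefix-building loop
theorem prefix_inv (arr : List Int) (m : Nat) (hm : m ≤ arr.length) :
    (PySem.List.pyRange 0 (m : Int) 1).foldl
        (fun p i =>
          PySem.List.pySetD p (i + 1)
            (PySem.Int.bxor (PySem.List.pyGetD p i 0) (PySem.List.pyGetD arr i 0)))
        (List.replicate (arr.length + 1) 0)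
      = (List.range (m + 1)).map (pxor arr) ++ List.replicate (arr.length - m) 0 := by
  induction m with
  | zero => simp [pxor, List.replicate_succ]
  | succ m ih =>
    have hm' : m ≤ arr.length := by omega
    rw [show ((m+1 : Nat) : Int) = (m : Int) + 1 by push_cast; ring,
        PySem.List.pyRange_one_succ_right (by positivity),
        List.foldl_concat, ih hm']
    have hlen : ((List.range (m + 1)).map (pxor arr)).length = m + 1 := by simp
    have hget : PySem.List.pyGetD
        ((List.range (m + 1)).map (pxor arr) ++ List.replicate (arr.length - m) 0) (m : Int) 0
        = pxor arr m := by
      rw [PySem.List.pyGetD_natCast]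
      rw [List.getD_eq_getElem _ _ (by simp; omega)]
      rw [List.getElem_append_left (by omega)]
      simp
    have hgetarr : PySem.List.pyGetD arr (m : Int) 0 = arr[m]'(by omega) := by
      rw [PySem.List.pyGetD_natCast, List.getD_eq_getElem _ _ (by omega)]
    simp only [hget, hgetarr]
    rw [show ((m : Int) + 1) = ((m+1 : Nat) : Int) by push_cast; ring,
        PySem.List.pySetD_natCast]
    have hrep : List.replicate (arr.length - m) (0:Int) = 0 :: List.replicate (arr.length - (m+1)) 0 := by
      rw [show arr.length - m = (arr.length - (m+1)) + 1 by omega, List.replicate_succ]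
    rw [hrep, List.set_append_right (m+1) _ (by omega), hlen, Nat.sub_self, List.set_cons_zero]
    simp [List.range_succ, pxor_succ arr m (by omega)]

-- invariant of B's sliding loop
theorem slide_inv (arr : List Int) (k : Int) (t : Nat) (hk : 1 ≤ k)
    (ht : k.toNat + t ≤ arr.length) :
    (PySem.List.pyRange k (k + (t : Int)) 1).foldl
        (fun (st : Int × Int) i =>
          (max st.1 (PySem.Int.bxor st.2
             (PySem.Int.bxor (PySem.List.pyGetD arr i 0) (PySem.List.pyGetD arr (i - k) 0))),
           PySem.Int.bxor st.2
             (PySem.Int.bxor (PySem.List.pyGetD arr i 0) (PySem.List.pyGetD arr (i - k) 0))))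
        (max 0 (wnd arr k.toNat k.toNat), wnd arr k.toNat k.toNat)
      = ((List.range (t + 1)).foldl (fun a s => max a (wnd arr k.toNat (k.toNat + s))) 0,
         wnd arr k.toNat (k.toNat + t)) := by
  induction t with
  | zero => simp
  | succ t ih =>
    have ht' : k.toNat + t ≤ arr.length := by omega
    rw [show k + ((t+1 : Nat) : Int) = (k + (t : Int)) + 1 by push_cast; ring,
        PySem.List.pyRange_one_succ_right (by omega), List.foldl_concat, ih ht']
    have hg1 : PySem.List.pyGetD arr (k + (t : Int)) 0 = arr[k.toNat + t]'(by omega) := by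
      rw [show k + (t : Int) = ((k.toNat + t : Nat) : Int) by omega, PySem.List.pyGetD_natCast,
          List.getD_eq_getElem _ _ (by omega)]
    have hg2 : PySem.List.pyGetD arr (k + (t : Int) - k) 0 = arr[t]'(by omega) := by
      rw [show k + (t : Int) - k = ((t : Nat) : Int) by ring, PySem.List.pyGetD_natCast,
          List.getD_eq_getElem _ _ (by omega)]
    simp only [hg1, hg2]
    have hw : PySem.Int.bxor (wnd arr k.toNat (k.toNat + t))
        (PySem.Int.bxor (arr[k.toNat + t]'(by omega)) (arr[t]'(by omega)))
        = wnd arr k.toNat (k.toNat + (t+1)) := by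
      unfold wnd
      rw [show k.toNat + t - k.toNat = t by omega, show k.toNat + (t+1) - k.toNat = t+1 by omega,
          show k.toNat + (t+1) = (k.toNat + t) + 1 by omega,
          pxor_succ arr (k.toNat + t) (by omega), pxor_succ arr t (by omega), bxor_shuffle]
    simp only [hw, List.range_succ, List.foldl_append, List.foldl_cons, List.foldl_nil]

-- ===== VERDICT (by name: the statement is the Claim_ definition above) =====
theorem maxSubarrayXOR_spec : Claim_equal_maxSubarrayXOR := by
  intro arr k _ hpre
  unfold Spec_maxSubarrayXOR maxSubarrayXOR maxSubarrayXOR_alt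
  simp only []
  by_cases hg : ((arr.length : Int) = 0 ∨ k = 0 ∨ (arr.length : Int) < k)
  · have hg' : ((arr.length : Int) = 0 ∨ k ≤ 0 ∨ (arr.length : Int) < k) := by
      rcases hg with h | h | h
      · exact Or.inl h
      · exact Or.inr (Or.inl (by omega))
      · exact Or.inr (Or.inr h)
    rw [if_pos hg, if_pos hg']
  · have hk0 : 0 ≤ k := by
      rcases hpre with h | h
      · exact h
      · exact absurd (by simp [h]) hg
    have hk1 : 1 ≤ k := by omega
    have hkn : k ≤ (arr.length : Int) := by omega
    have hg' : ¬ ((arr.length : Int) = 0 ∨ k ≤ 0 ∨ (arr.length : Int) < k) := by omega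
    rw [if_neg hg, if_neg hg']
    rw [show ((arr.length : Int) + 1).toNat = arr.length + 1 from by omega]
    rw [prefix_inv arr arr.length le_rfl]
    simp only [Nat.sub_self, List.replicate_zero, List.append_nil]
    rw [PySem.List.pyRange_one (k - 1) (arr.length : Int), List.foldl_map]
    rw [show ((arr.length : Int) - (k - 1)).toNat = arr.length - k.toNat + 1 from by omega]
    have hbody : ∀ (a : Int) (s : Nat), s ∈ List.range (arr.length - k.toNat + 1) →
        max a (PySem.Int.bxor
            (PySem.List.pyGetD (List.map (pxor arr) (List.range (arr.length + 1))) (k - 1 + (s : Int) + 1) 0)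
            (PySem.List.pyGetD (List.map (pxor arr) (List.range (arr.length + 1))) (k - 1 + (s : Int) + 1 - k) 0))
          = max a (wnd arr k.toNat (k.toNat + s)) := by
      intro a s hs
      have hs' : s < arr.length - k.toNat + 1 := List.mem_range.mp hs
      rw [show k - 1 + (s : Int) + 1 = ((k.toNat + s : Nat) : Int) from by omega,
          show ((k.toNat + s : Nat) : Int) - k = ((s : Nat) : Int) from by omega]
      rw [PySem.List.pyGetD_natCast, PySem.List.pyGetD_natCast]
      rw [List.getD_eq_getElem _ _ (by simp; omega), List.getD_eq_getElem _ _ (by simp; omega)]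
      simp only [List.getElem_map, List.getElem_range]
      unfold wnd
      rw [show k.toNat + s - k.toNat = s from by omega]
    rw [PySem.List.foldl_congr_mem _ _ _ _ hbody]
    have hwin : List.foldl (fun w x => PySem.Int.bxor w x) 0 (PySem.List.slice arr none (some k))
        = wnd arr k.toNat k.toNat := by
      rw [PySem.List.slice_to arr hk0]
      unfold wnd
      rw [Nat.sub_self]
      simp [pxor]
    rw [hwin]
    rw [show (arr.length : Int) = k + ((arr.length - k.toNat : Nat) : Int) from by omega]
    rw [slide_inv arr k (arr.length - k.toNat) hk1 (by omega)]
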